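-- pv_equiv track=rewrite | github.com/scott-dunphy/attribution | attribution/brinson_fachler.py | get_trailing_periods
-- ===== SOURCE A (Python) =====
-- TRAILING_PERIOD_DEFS = {
--     '1Q': 1,
--     '1Y': 4,
--     '3Y': 12,
--     '5Y': 20,
--     '7Y': 28,
--     '10Y': 40,
--     'SI': None,  # Since inception = all available
-- }
--
-- def get_trailing_periods(all_periods, as_of, trailing_key):
--     """
--     Given sorted list of (year, quarter) tuples, an as_of (year, quarter),
--     and a trailing period key, return the list of periods in that window.
--     """
--     # Filter to periods <= as_of
--     eligible = [p for p in all_periods if p <= as_of]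
--     if not eligible:
--         return []
--
--     n_quarters = TRAILING_PERIOD_DEFS.get(trailing_key)
--     if n_quarters is None:
--         return eligible  # Since inception
--     return eligible[-n_quarters:]
-- ===== SOURCE B (Python) =====
-- TRAILING_PERIOD_DEFS = {
--     '1Q': 1,
--     '1Y': 4,
--     '3Y': 12,
--     '5Y': 20,
--     '7Y': 28,
--     '10Y': 40,
--     'SI': None,  # Since inception = all available
-- }
--
-- def get_trailing_periods(all_periods, as_of, trailing_key):
--     # One pass with a bounded sliding buffer: keep only the last n_quarters
--     # eligible periods while scanning, instead of materialising the full
--     # eligible list and slicing it afterwards.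
--     n = TRAILING_PERIOD_DEFS.get(trailing_key)
--     buf = []
--     for p in all_periods:
--         if p <= as_of:
--             buf.append(p)
--             if n is not None and len(buf) > n:
--                 buf = buf[1:]
--     return buf
-- ===== Notes on version B (the rewrite author's own statement) =====
-- stated objective: alternative
-- what changed: Instead of materialising the full list of eligible periods and slicing its last n_quarters, B makes a single pass keeping a bounded sliding buffer of only the last n_quarters eligible periods.
import Mathlib
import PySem

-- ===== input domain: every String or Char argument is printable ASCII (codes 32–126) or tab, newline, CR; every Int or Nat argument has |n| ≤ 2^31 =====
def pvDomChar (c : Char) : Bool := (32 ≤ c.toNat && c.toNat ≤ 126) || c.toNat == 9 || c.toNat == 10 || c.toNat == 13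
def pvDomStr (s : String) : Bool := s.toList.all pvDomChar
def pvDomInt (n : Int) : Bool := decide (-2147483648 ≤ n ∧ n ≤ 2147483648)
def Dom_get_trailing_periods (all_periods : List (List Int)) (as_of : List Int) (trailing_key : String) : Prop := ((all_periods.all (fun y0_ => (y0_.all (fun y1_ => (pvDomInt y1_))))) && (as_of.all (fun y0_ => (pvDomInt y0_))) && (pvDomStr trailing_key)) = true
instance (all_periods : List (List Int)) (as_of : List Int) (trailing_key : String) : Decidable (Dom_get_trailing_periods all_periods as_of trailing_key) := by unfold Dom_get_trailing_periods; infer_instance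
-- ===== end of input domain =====

-- B replaces A's filter-everything-then-slice with a single pass that keeps only a
-- bounded sliding buffer of the last n_quarters eligible periods (objective: alternative).

-- Shared helpers: the module constant TRAILING_PERIOD_DEFS and Python's `p <= as_of`
-- (lexicographic comparison of int lists), exact on all int lists.
def tpDefs : PySem.Dict String (Option Int) :=
  PySem.Dict.ofList [("1Q", some 1), ("1Y", some 4), ("3Y", some 12), ("5Y", some 20),
                     ("7Y", some 28), ("10Y", some 40), ("SI", none)]

-- Python list/tuple `<=` on int sequences: lexicographic, a strict prefix is smaller.
def pyListLe : List Int → List Int → Bool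
  | [], _ => true
  | _ :: _, [] => false
  | a :: as_, b :: bs => if a < b then true else if b < a then false else pyListLe as_ bs

-- ===== PORT A =====
def get_trailing_periods (all_periods : List (List Int)) (as_of : List Int) (trailing_key : String) : List (List Int) :=
  let eligible := all_periods.filter (fun p => pyListLe p as_of)
  if eligible = [] then []
  else
    -- TRAILING_PERIOD_DEFS.get(trailing_key): None both for a missing key and for 'SI'
    match tpDefs.getD trailing_key none with
    | none => eligible                                      -- Since inception
    | some n => PySem.List.slice eligible (some (-n)) none  -- eligible[-n_quarters:]

-- ===== PORT B =====
def get_trailing_periods_alt (all_periods : List (List Int)) (as_of : List Int) (trailing_key : String) : List (List Int) :=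
  let n := tpDefs.getD trailing_key none
  all_periods.foldl (fun buf p =>
    if pyListLe p as_of then
      match n with
      | some k => if ((buf ++ [p]).length : Int) > k then (buf ++ [p]).drop 1 else buf ++ [p]
      | none => buf ++ [p]
    else buf) []

-- ===== PRECONDITION & SPEC =====
def Spec_get_trailing_periods (all_periods : List (List Int)) (as_of : List Int) (trailing_key : String) (out : List (List Int)) : Prop := out = get_trailing_periods_alt all_periods as_of trailing_key
instance (all_periods : List (List Int)) (as_of : List Int) (trailing_key : String) (out : List (List Int)) : Decidable (Spec_get_trailing_periods all_periods as_of trailing_key out) := by unfold Spec_get_trailing_periods; infer_instance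

-- ===== CLAIM (what is proved, stated in full; the proofs are below) =====
def Claim_equal_get_trailing_periods : Prop := ∀ (all_periods : List (List Int)) (as_of : List Int) (trailing_key : String), Dom_get_trailing_periods all_periods as_of trailing_key → Spec_get_trailing_periods all_periods as_of trailing_key (get_trailing_periods all_periods as_of trailing_key)

-- ===== LEMMAS AND PROOFS =====

-- Every value TRAILING_PERIOD_DEFS.get can yield: None, or a positive quarter count.
theorem tpDefs_values (s : String) :
    tpDefs.getD s none = none ∨ ∃ m : Nat, 1 ≤ m ∧ tpDefs.getD s none = some (m : Int) := by
  have hitems : tpDefs.items = [("1Q", some 1), ("1Y", some 4), ("3Y", some 12), ("5Y", some 20),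
      ("7Y", some 28), ("10Y", some 40), ("SI", none)] := by decide
  simp only [PySem.Dict.getD, PySem.Dict.get?, hitems, List.find?]
  repeat' split
  all_goals simp_all
  · exact ⟨1, by norm_num⟩
  · exact ⟨4, by norm_num⟩
  · exact ⟨12, by norm_num⟩
  · exact ⟨20, by norm_num⟩
  · exact ⟨28, by norm_num⟩
  · exact ⟨40, by norm_num⟩

-- B's bounded sliding buffer computes the last m elements of the filtered list.
theorem foldl_lastN (c : List Int → Bool) (m : Nat) (xs : List (List Int)) :
    ∀ buf : List (List Int), buf.length ≤ m →
    xs.foldl (fun buf p =>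
        if c p then
          if ((buf ++ [p]).length : Int) > (m : Int) then (buf ++ [p]).drop 1 else buf ++ [p]
        else buf) buf
      = (buf ++ xs.filter c).drop ((buf ++ xs.filter c).length - m) := by
  induction xs with
  | nil =>
      intro buf h
      simp [List.foldl, Nat.sub_eq_zero_of_le (by simpa using h)]
  | cons x xs ih =>
      intro buf h
      by_cases hc : c x
      · simp only [List.foldl, hc, if_pos, List.filter_cons_of_pos hc]
        by_cases hlen : ((buf ++ [x]).length : Int) > (m : Int)
        · rw [if_pos hlen]
          have hbm : buf.length = m := by
            simp at hlen; omega
          have hdrop : ((buf ++ [x]).drop 1).length ≤ m := by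
            simp; omega
          have h2 : buf ++ x :: List.filter c xs = (buf ++ [x]) ++ List.filter c xs := by simp
          have h1 : ((buf ++ [x]) ++ List.filter c xs).drop 1 = (buf ++ [x]).drop 1 ++ List.filter c xs :=
            List.drop_append_of_le_length (by simp)
          rw [ih _ hdrop, h2, ← h1, List.drop_drop]
          congr 1
          simp [hbm]
          omega
        · rw [if_neg hlen]
          have hbm : (buf ++ [x]).length ≤ m := by
            simp at hlen ⊢; omega
          rw [ih _ hbm]
          have h2 : buf ++ x :: List.filter c xs = (buf ++ [x]) ++ List.filter c xs := by simp
          rw [h2]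
      · simp only [List.foldl, hc, if_neg, List.filter_cons_of_neg hc, Bool.false_eq_true,
          not_false_iff]
        exact ih buf h

-- ===== VERDICT (by name: the statement is the Claim_ definition above) =====
theorem get_trailing_periods_spec : Claim_equal_get_trailing_periods := by
  intro all_periods as_of trailing_key _
  unfold Spec_get_trailing_periods get_trailing_periods get_trailing_periods_alt
  rcases tpDefs_values trailing_key with h | ⟨m, hm1, h⟩
  · rw [h]
    simp only []
    rw [PySem.List.foldl_append_if_eq_filter]
    by_cases he : all_periods.filter (fun p => pyListLe p as_of) = [] <;> simp [he]
  · rw [h]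
    simp only []
    rw [foldl_lastN (fun p => pyListLe p as_of) m all_periods [] (by simp)]
    rw [PySem.List.slice_from_neg_natCast (List.filter (fun p => pyListLe p as_of) all_periods) m hm1]
    by_cases he : all_periods.filter (fun p => pyListLe p as_of) = [] <;> simp [he]
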